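-- pv_equiv track=rewrite | github.com/codeproy/newPython | flipbit.py | flipbit
-- ===== SOURCE A (Python) =====
-- def  flipbit(rcv):
--     num = int(rcv)
--     bin_num = ''
--
--     while num > 0:
--           bin_num = str(num % 2) + bin_num
--           num = num // 2
--     bin_num = (32-len(bin_num)) * '0' + bin_num
--
--     list_num = list(bin_num)
--     for i in range(0,len(list_num)):
--         if int(list_num[i]) == 0:
--             list_num[i] = 1
--         elif int(list_num[i]) == 1:
--             list_num[i] = 0
--
--     rever_num = ''.join(str(l) for l in list_num)
--
--     rever_int = int(rever_num, 2)
--     return(rever_int)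
-- ===== SOURCE B (Python) =====
-- def flipbit(rcv):
--     n = max(int(rcv), 0)
--     w = max(32, n.bit_length())
--     return (1 << w) - 1 - n
-- ===== Notes on version B (the rewrite author's own statement) =====
-- stated objective: simpler
-- what changed: Replaces the binary-string construction, per-character flip loop and base-2 reparse with a closed-form arithmetic formula: two to the power max(32, bit_length of the clamped input), minus one, minus the clamped input.
import Mathlib
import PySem

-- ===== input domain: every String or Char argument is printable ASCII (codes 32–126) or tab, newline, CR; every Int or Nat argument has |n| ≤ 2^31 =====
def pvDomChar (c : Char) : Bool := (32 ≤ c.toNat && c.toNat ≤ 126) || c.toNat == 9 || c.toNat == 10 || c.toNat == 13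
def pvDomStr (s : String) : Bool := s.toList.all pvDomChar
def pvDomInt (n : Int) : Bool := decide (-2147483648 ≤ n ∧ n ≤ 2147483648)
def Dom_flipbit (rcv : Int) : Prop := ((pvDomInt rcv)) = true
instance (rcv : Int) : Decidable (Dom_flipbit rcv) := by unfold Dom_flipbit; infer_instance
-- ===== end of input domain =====

-- B replaces A's binary-string build / per-char flip / base-2 reparse with the closed form
-- 2^max(32, bit_length(max(n,0))) - 1 - max(n,0); objective: simpler (constant-time arithmetic).


-- ===== PORT A =====
-- Python's int(c) on a single digit char (only '0'/'1' is ever reached here)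
def pvDigit (c : Char) : Int := (c.toNat : Int) - 48

-- the while loop: bin_num = str(num % 2) + bin_num; num = num // 2
-- (the string bin_num is ported as its character list; prepending at each step
--  is the recursion "result of num//2 ++ str(num % 2)")
def pvBinLoop (num : Int) : List Char :=
  if _h : 0 < num then
    pvBinLoop (PySem.Int.floordiv num 2) ++ (PySem.Int.toStr (PySem.Int.mod num 2)).toList
  else []
termination_by num.toNat
decreasing_by
  rw [PySem.Int.floordiv_eq_ediv_of_pos (by omega : (0:Int) < 2)]
  omega

-- int(s, 2), ported by hand as the left fold over the binary digit chars;
-- exact for strings of '0'/'1' digits, the only strings reached here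
def pvParseBin (cs : List Char) : Int := cs.foldl (fun a c => 2 * a + pvDigit c) 0

def flipbit (rcv : Int) : Int :=
  let num := rcv                                      -- int(rcv) on an int is the identity
  let bin0 := pvBinLoop num
  -- bin_num = (32 - len(bin_num)) * '0' + bin_num  (Nat subtraction = Python's negative repeat → '')
  let bin := List.replicate (32 - bin0.length) '0' ++ bin0
  -- the flip loop: int(c)==0 → 1, elif int(c)==1 → 0 (else keeps the char; unreachable: only '0'/'1' occur)
  let listNum : List Int :=
    bin.map (fun c => if pvDigit c = 0 then 1 else if pvDigit c = 1 then 0 else pvDigit c)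
  -- ''.join(str(l) for l in list_num)
  let reverNum := listNum.flatMap (fun l => (PySem.Int.toStr l).toList)
  pvParseBin reverNum                                 -- int(rever_num, 2)

-- ===== PORT B =====
def flipbit_alt (rcv : Int) : Int :=
  let n := max rcv 0
  let w := max 32 (PySem.Int.bitLength n)
  2 ^ w - 1 - n

-- ===== PRECONDITION & SPEC =====
def Spec_flipbit (rcv : Int) (out : Int) : Prop := out = flipbit_alt rcv
instance (rcv : Int) (out : Int) : Decidable (Spec_flipbit rcv out) := by unfold Spec_flipbit; infer_instance

-- ===== CLAIM (what is proved, stated in full; the proofs are below) =====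
def Claim_equal_flipbit : Prop := ∀ (rcv : Int), Dom_flipbit rcv → Spec_flipbit rcv (flipbit rcv)

-- ===== LEMMAS AND PROOFS =====

def pvBin (cs : List Char) : Prop := ∀ c ∈ cs, c = '0' ∨ c = '1'

theorem pvToStr0 : (PySem.Int.toStr 0).toList = ['0'] := by decide
theorem pvToStr1 : (PySem.Int.toStr 1).toList = ['1'] := by decide

theorem pvParse_aux (cs : List Char) (a : Int) :
    cs.foldl (fun a c => 2 * a + pvDigit c) a = a * 2 ^ cs.length + pvParseBin cs := by
  induction cs generalizing a with
  | nil => simp [pvParseBin]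
  | cons c cs ih =>
    simp only [List.foldl_cons, List.length_cons, pvParseBin] at *
    rw [ih, ih (2 * 0 + pvDigit c)]
    ring

theorem pvParseBin_cons (d : Char) (r : List Char) :
    pvParseBin (d :: r) = pvDigit d * 2 ^ r.length + pvParseBin r := by
  rw [pvParseBin, List.foldl_cons, pvParse_aux]
  norm_num [pvParseBin]

theorem pvParseBin_append (cs ds : List Char) :
    pvParseBin (cs ++ ds) = pvParseBin cs * 2 ^ ds.length + pvParseBin ds := by
  simp only [pvParseBin, List.foldl_append]
  rw [pvParse_aux]
  rfl

theorem pvP0 : pvParseBin ['0'] = 0 := by decide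
theorem pvP1 : pvParseBin ['1'] = 1 := by decide

theorem pvBinLoop_spec (num : Int) (h : 0 < num) :
    pvBin (pvBinLoop num) ∧ (pvBinLoop num).length = PySem.Int.bitLength num ∧
      pvParseBin (pvBinLoop num) = num := by
  induction hn : num.toNat using Nat.strong_induction_on generalizing num with
  | _ n ih =>
  have h2 : (0:Int) < 2 := by omega
  have hq : PySem.Int.floordiv num 2 = num / 2 := PySem.Int.floordiv_eq_ediv_of_pos h2
  have hr : PySem.Int.mod num 2 = num % 2 := PySem.Int.mod_eq_emod_of_pos h2
  have hnum := PySem.Int.floordiv_mul_add_mod num 2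
  have hrv : PySem.Int.mod num 2 = 0 ∨ PySem.Int.mod num 2 = 1 := by rw [hr]; omega
  rw [pvBinLoop, dif_pos h]
  by_cases hq0 : 0 < PySem.Int.floordiv num 2
  · have hlt : (PySem.Int.floordiv num 2).toNat < n := by rw [hq] at hq0 ⊢; omega
    obtain ⟨hb, hl, hp⟩ := ih _ hlt _ hq0 rfl
    have hbl := PySem.Int.bitLength_of_pos h
    refine ⟨?_, ?_, ?_⟩
    · intro c hc
      rcases List.mem_append.mp hc with hc | hc
      · exact hb c hc
      · rcases hrv with hm | hm <;> rw [hm] at hc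
        · rw [pvToStr0] at hc; simp at hc; simp [hc]
        · rw [pvToStr1] at hc; simp at hc; simp [hc]
    · rcases hrv with hm | hm <;> rw [hm]
      · rw [List.length_append, pvToStr0, hl, hbl]; rfl
      · rw [List.length_append, pvToStr1, hl, hbl]; rfl
    · rw [pvParseBin_append, hp]
      rcases hrv with hm | hm <;> rw [hm]
      · rw [pvToStr0, pvP0]
        simp only [List.length_singleton, pow_one]
        omega
      · rw [pvToStr1, pvP1]
        simp only [List.length_singleton, pow_one]
        omega
  · -- floordiv num 2 = 0, so num = 1 and the recursive call returns []
    have h1 : num = 1 := by rw [hq] at hq0; omega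
    have hnil : pvBinLoop (PySem.Int.floordiv num 2) = [] := by
      rw [pvBinLoop, dif_neg hq0]
    have hm : PySem.Int.mod num 2 = 1 := by rw [hr, h1]; decide
    rw [hnil, List.nil_append, hm, pvToStr1, h1]
    refine ⟨?_, by decide, by decide⟩
    intro c hc
    simp at hc; simp [hc]

theorem pvParseBin_pad (k : Nat) (cs : List Char) :
    pvParseBin (List.replicate k '0' ++ cs) = pvParseBin cs := by
  rw [pvParseBin_append]
  have hz : pvParseBin (List.replicate k '0') = 0 := by
    induction k with
    | zero => simp [pvParseBin]
    | succ k ih =>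
      rw [List.replicate_succ, pvParseBin_cons, ih]
      simp [show pvDigit '0' = 0 from by decide]
  rw [hz]; ring

theorem pvIf0 : (if pvDigit '0' = 0 then (1:Int) else if pvDigit '0' = 1 then 0 else pvDigit '0') = 1 := by decide
theorem pvIf1 : (if pvDigit '1' = 0 then (1:Int) else if pvDigit '1' = 1 then 0 else pvDigit '1') = 0 := by decide
-- length of the joined flipped rendering of a '0'/'1' list
theorem pvFlipLen (cs : List Char) (hb : pvBin cs) :
    ((cs.map (fun c => if pvDigit c = 0 then (1:Int) else if pvDigit c = 1 then 0 else pvDigit c)).flatMap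
        (fun l => (PySem.Int.toStr l).toList)).length = cs.length := by
  induction cs with
  | nil => simp
  | cons d ds ih =>
    have hbd : pvBin ds := fun x hx => hb x (List.mem_cons_of_mem _ hx)
    rcases hb d List.mem_cons_self with hd | hd <;> subst hd
    · simp only [List.map_cons, List.flatMap_cons, pvIf0, pvToStr1, List.length_append,
        List.length_cons, List.length_nil, ih hbd]
      omega
    · simp only [List.map_cons, List.flatMap_cons, pvIf1, pvToStr0, List.length_append,
        List.length_cons, List.length_nil, ih hbd]
      omega

-- A's flip-then-join-then-parse over a '0'/'1' list is the binary complement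
theorem pvFlip_spec (cs : List Char) (hb : pvBin cs) :
    pvParseBin ((cs.map (fun c => if pvDigit c = 0 then (1:Int) else if pvDigit c = 1 then 0 else pvDigit c)).flatMap
        (fun l => (PySem.Int.toStr l).toList)) = 2 ^ cs.length - 1 - pvParseBin cs := by
  induction cs with
  | nil => simp [pvParseBin]
  | cons c cs ih =>
    have hbc : pvBin cs := fun x hx => hb x (List.mem_cons_of_mem _ hx)
    have hlen := pvFlipLen cs hbc
    have d0 : pvDigit '0' = 0 := by decide
    have d1 : pvDigit '1' = 1 := by decide
    rcases hb c List.mem_cons_self with hc | hc <;> subst hc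
    · simp only [List.map_cons, List.flatMap_cons, pvIf0, pvToStr1, List.length_cons]
      rw [List.singleton_append, pvParseBin_cons, hlen, ih hbc, pvParseBin_cons, d0, d1]
      ring
    · simp only [List.map_cons, List.flatMap_cons, pvIf1, pvToStr0, List.length_cons]
      rw [List.singleton_append, pvParseBin_cons, hlen, ih hbc, pvParseBin_cons, d0, d1]
      ring

-- ===== VERDICT (by name: the statement is the Claim_ definition above) =====
theorem flipbit_spec : Claim_equal_flipbit := by
  intro rcv _
  show flipbit rcv = flipbit_alt rcv
  have e1 : flipbit rcv = pvParseBin (((List.replicate (32 - (pvBinLoop rcv).length) '0' ++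
      pvBinLoop rcv).map (fun c => if pvDigit c = 0 then (1:Int) else if pvDigit c = 1 then 0 else pvDigit c)).flatMap
      (fun l => (PySem.Int.toStr l).toList)) := rfl
  have e2 : flipbit_alt rcv = 2 ^ (max 32 (PySem.Int.bitLength (max rcv 0))) - 1 - max rcv 0 := rfl
  by_cases h : 0 < rcv
  · obtain ⟨hb, hl, hp⟩ := pvBinLoop_spec rcv h
    have hbin : pvBin (List.replicate (32 - (pvBinLoop rcv).length) '0' ++ pvBinLoop rcv) := by
      intro c hc
      rcases List.mem_append.mp hc with hc | hc
      · left; exact List.eq_of_mem_replicate hc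
      · exact hb c hc
    have hL : (List.replicate (32 - (pvBinLoop rcv).length) '0' ++ pvBinLoop rcv).length =
        max 32 (PySem.Int.bitLength rcv) := by
      rw [List.length_append, List.length_replicate, hl]
      omega
    have hmax : max rcv 0 = rcv := by omega
    rw [e1, e2, pvFlip_spec _ hbin, pvParseBin_pad, hp, hL, hmax]
  · have h0 : pvBinLoop rcv = [] := by rw [pvBinLoop, dif_neg h]
    have hmax : max rcv 0 = 0 := by omega
    rw [e1, e2, h0, hmax]
    have hbin : pvBin (List.replicate (32 - ([] : List Char).length) '0' ++ ([] : List Char)) := by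
      intro c hc
      left
      rw [List.append_nil] at hc
      exact List.eq_of_mem_replicate hc
    rw [pvFlip_spec _ hbin, pvParseBin_pad]
    norm_num [pvParseBin, PySem.Int.bitLength_zero]
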